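-- pv_equiv track=rewrite | github.com/deysantanu84/python-portfolio | problemSolving/queues/taskScheduling.py | solve
-- ===== SOURCE A (Python) =====
-- def solve(A, B):
--     result = 0
--     queue = []
--
--     for i in range(len(A)):
--         queue.append(A[i])
--
--     for i in range(len(B)):
--         while len(queue) and queue[0] != B[i]:
--             queue.append(queue.pop(0))
--             result += 1
--
--         if queue[0] == B[i]:
--             queue.pop(0)
--             result += 1
--
--     return result
-- ===== SOURCE B (Python) =====
-- def solve(A, B):
--     # Instead of rotating the queue one element at a time, locate each target
--     # directly with .index and rebuild the queue with two slices.
--     queue = list(A)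
--     result = 0
--     for b in B:
--         j = queue.index(b)
--         result += j + 1
--         queue = queue[j + 1:] + queue[:j]
--     return result
-- ===== Notes on version B (the rewrite author's own statement) =====
-- stated objective: simpler
-- what changed: B replaces A's element-by-element queue rotation (pop(0)/append once per rotation, counting each) by locating each task directly with list.index and rebuilding the queue with two slices, adding index+1 in one step.
import Mathlib
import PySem

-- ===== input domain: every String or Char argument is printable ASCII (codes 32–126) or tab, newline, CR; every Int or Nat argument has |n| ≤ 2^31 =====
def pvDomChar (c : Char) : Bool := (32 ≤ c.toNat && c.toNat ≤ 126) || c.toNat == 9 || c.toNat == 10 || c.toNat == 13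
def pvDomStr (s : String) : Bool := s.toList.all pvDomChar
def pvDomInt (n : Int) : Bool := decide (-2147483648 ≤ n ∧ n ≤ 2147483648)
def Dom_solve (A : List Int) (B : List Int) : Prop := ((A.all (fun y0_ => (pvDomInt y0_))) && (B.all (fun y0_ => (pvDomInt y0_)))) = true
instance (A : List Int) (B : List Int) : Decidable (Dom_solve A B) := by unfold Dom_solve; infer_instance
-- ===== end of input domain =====

-- B finds each task's position directly with list.index (one scan + two slices) instead of
-- A's element-by-element rotation; objective: simpler (one step per task, no inner loop).

-- ===== PORT A =====
-- 'while len(queue) and queue[0] != B[i]: queue.append(queue.pop(0)); result += 1'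
-- ported with fuel = queue.length; inside Pre_solve the target is in the queue, so
-- it is found after fewer than queue.length rotations and the fuel is never exhausted.
def rotLoop : Nat → List Int → Int → Int → List Int × Int
  | 0, q, _, r => (q, r)
  | _ + 1, [], _, r => ([], r)
  | fuel + 1, q0 :: rest, b, r =>
    if q0 ≠ b then rotLoop fuel (rest ++ [q0]) b (r + 1) else (q0 :: rest, r)

-- one iteration of A's 'for i in range(len(B))' body
def solveStep (st : List Int × Int) (b : Int) : List Int × Int :=
  let st1 := rotLoop st.1.length st.1 b st.2
  match st1.1 with
  | [] => st1                         -- here Python's 'queue[0]' raises IndexError (excluded by Pre_solve)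
  | q0 :: rest => if q0 = b then (rest, st1.2 + 1) else st1

def solve (A : List Int) (B : List Int) : Int :=
  -- 'for i in range(len(A)): queue.append(A[i])' appends the elements of A in order
  let queue := A.foldl (fun q a => q ++ [a]) []
  (B.foldl solveStep (queue, 0)).2

-- ===== PORT B =====
def solveAltStep (st : List Int × Int) (b : Int) : List Int × Int :=
  match PySem.List.index? st.1 b with
  | none => st                        -- here Python's 'queue.index(b)' raises ValueError (excluded by Pre_solve)
  | some j => (st.1.drop (j + 1) ++ st.1.take j, st.2 + ((j : Int) + 1))

def solve_alt (A : List Int) (B : List Int) : Int :=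
  (B.foldl solveAltStep (A, 0)).2

-- ===== PRECONDITION & SPEC =====
-- Pre_solve: each task B[i], in order, occurs among the still-unprocessed elements of A
-- (one occurrence is consumed per task).  Outside it A raises IndexError or loops forever.
def preB : List Int → List Int → Bool
  | _, [] => true
  | q, b :: bs => q.contains b && preB (q.erase b) bs

def Pre_solve (A : List Int) (B : List Int) : Prop := preB A B = true
instance (A : List Int) (B : List Int) : Decidable (Pre_solve A B) := by unfold Pre_solve; infer_instance

def pvWitness_solve : List Int × List Int := ([1, 2, 3, 2], [2, 1, 3, 2])

def Spec_solve (A : List Int) (B : List Int) (out : Int) : Prop := out = solve_alt A B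
instance (A : List Int) (B : List Int) (out : Int) : Decidable (Spec_solve A B out) := by unfold Spec_solve; infer_instance

-- ===== CLAIM (what is proved, stated in full; the proofs are below) =====
def Claim_equal_solve : Prop := ∀ (A : List Int) (B : List Int), Dom_solve A B → Pre_solve A B → Spec_solve A B (solve A B)

-- ===== LEMMAS AND PROOFS =====

theorem foldl_append_id (l acc : List Int) : l.foldl (fun q a => q ++ [a]) acc = acc ++ l := by
  induction l generalizing acc with
  | nil => simp
  | cons x xs ih => simp [List.foldl, ih]

-- the rotation loop, run with enough fuel, rotates the first occurrence of b to the front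
theorem rotLoop_spec (fuel : Nat) : ∀ (q : List Int) (b r : Int) (j : Nat),
    PySem.List.index? q b = some j → j ≤ fuel →
    rotLoop fuel q b r = (q.drop j ++ q.take j, r + (j : Int)) := by
  induction fuel with
  | zero =>
    intro q b r j hidx hj
    interval_cases j
    cases q with
    | nil => simp [PySem.List.index?] at hidx
    | cons q0 rest => simp [rotLoop]
  | succ fuel ih =>
    intro q b r j hidx hj
    cases q with
    | nil => simp [PySem.List.index?] at hidx
    | cons q0 rest =>
      by_cases h0 : q0 = b
      · subst h0
        rw [PySem.List.index?_cons_self] at hidx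
        cases hidx
        simp [rotLoop]
      · rw [PySem.List.index?_cons_of_ne rest h0] at hidx
        cases hrest : PySem.List.index? rest b with
        | none => rw [hrest] at hidx; simp at hidx
        | some j' =>
          rw [hrest] at hidx
          simp at hidx
          subst hidx
          have hmem : b ∈ rest := by
            have := (PySem.List.index?_isSome_iff rest b).1
            exact this (by rw [hrest]; rfl)
          have hlt : j' < rest.length := by
            obtain ⟨pre, suf, hq, hlen, _⟩ := (PySem.List.index?_eq_some_iff rest b j').1 hrest
            subst hq; simp [← hlen]
          have happ : PySem.List.index? (rest ++ [q0]) b = some j' := by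
            rw [PySem.List.index?_append_of_mem _ hmem, hrest]
          have := ih (rest ++ [q0]) b (r + 1) j' happ (by omega)
          simp only [rotLoop, if_pos h0]
          rw [this, Prod.mk.injEq]
          constructor
          · rw [List.drop_append_of_le_length (by omega), List.take_append_of_le_length (by omega)]
            simp [List.drop_succ_cons, List.take_succ_cons, List.append_assoc]
          · push_cast; ring

-- when b is in the queue, one step of A equals one step of B
theorem step_eq (q : List Int) (r b : Int) (hb : b ∈ q) :
    solveStep (q, r) b = solveAltStep (q, r) b := by
  cases hidx : PySem.List.index? q b with
  | none => exact absurd ((PySem.List.index?_eq_none_iff q b).1 hidx) (by simp [hb])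
  | some j =>
    obtain ⟨hj, hget, _⟩ := PySem.List.getElem_of_index?_eq_some hidx
    have hrot := rotLoop_spec q.length q b r j hidx (le_of_lt hj)
    have hdrop : q.drop j = b :: q.drop (j + 1) := by
      rw [List.drop_eq_getElem_cons hj, hget]
    simp only [solveStep, solveAltStep, hidx, hrot, hdrop]
    simp [List.cons_append]
    ring

-- preB only depends on the queue as a multiset
theorem preB_perm (B : List Int) : ∀ (q q' : List Int), q.Perm q' → preB q B = preB q' B := by
  induction B with
  | nil => intro q q' _; rfl
  | cons b bs ih =>
    intro q q' hperm
    simp only [preB]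
    rw [ih (q.erase b) (q'.erase b) (hperm.erase b)]
    congr 1
    simp [hperm.mem_iff]

-- the queue after a B-step is a permutation of the old queue with b erased
theorem step_queue_perm (q : List Int) (b : Int) (j : Nat)
    (hidx : PySem.List.index? q b = some j) :
    (q.drop (j + 1) ++ q.take j).Perm (q.erase b) := by
  obtain ⟨pre, suf, hq, hlen, hnot⟩ := (PySem.List.index?_eq_some_iff q b j).1 hidx
  subst hq
  have htake : (pre ++ b :: suf).take j = pre := by
    rw [← hlen, List.take_append_of_le_length (le_refl _), List.take_length]
  have hdrop : (pre ++ b :: suf).drop (j + 1) = suf := by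
    rw [← List.drop_drop, ← hlen, List.drop_left, List.drop_one, List.tail_cons]
  have herase : (pre ++ b :: suf).erase b = pre ++ suf := by
    rw [List.erase_append_right _ (by simpa using hnot), List.erase_cons_head]
  rw [htake, hdrop, herase]
  exact List.perm_append_comm

theorem fold_eq (B : List Int) : ∀ (q : List Int) (r : Int), preB q B = true →
    B.foldl solveStep (q, r) = B.foldl solveAltStep (q, r) := by
  induction B with
  | nil => intro q r _; rfl
  | cons b bs ih =>
    intro q r hpre
    simp only [preB, Bool.and_eq_true, List.contains_iff_mem] at hpre
    obtain ⟨hmem, hrest⟩ := hpre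
    have hmem' : b ∈ q := by simpa using hmem
    cases hidx : PySem.List.index? q b with
    | none => exact absurd ((PySem.List.index?_eq_none_iff q b).1 hidx) (by simp [hmem'])
    | some j =>
      have hstep := step_eq q r b hmem'
      simp only [List.foldl_cons, hstep, solveAltStep, hidx]
      exact ih _ _ (by rw [preB_perm bs _ _ (step_queue_perm q b j hidx)]; exact hrest)

-- ===== VERDICT (by name: the statement is the Claim_ definition above) =====
theorem solve_spec : Claim_equal_solve := by
  intro A B _ hpre
  unfold Spec_solve solve solve_alt
  simp only []
  rw [foldl_append_id, List.nil_append, fold_eq B A 0 hpre]
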